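-- pv_equiv track=rewrite | github.com/Sichovuk/MLTA-labs | MLTA_lab4.py | decompose_even_powers
-- ===== SOURCE A (Python) =====
-- def decompose_even_powers(n):
--     if n < 1 or n > 1000:
--         return "n має бути в межах 1 ≤ n ≤ 1000"
--
--     result = []
--     remaining = n
--
--     powers = []
--     p = 1
--     while p <= n:
--         powers.append(p)
--         p *= 4
--     powers.reverse()
--
--     for p in powers:
--         while remaining >= p:
--             result.append(str(p))
--             remaining -= p
--
--     return "+".join(result)
-- ===== SOURCE B (Python) =====
-- def decompose_even_powers(n):
--     if n < 1 or n > 1000: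
--         return "n має бути в межах 1 ≤ n ≤ 1000"
--     digits = []  # (power, digit) pairs, lowest power first
--     p = 1
--     m = n
--     while m > 0:
--         digits.append((p, m % 4))
--         m //= 4
--         p *= 4
--     result = []
--     for p, d in reversed(digits):
--         result.extend([str(p)] * d)
--     return "+".join(result)
-- ===== Notes on version B (the rewrite author's own statement) =====
-- stated objective: alternative
-- what changed: B extracts the base-four digits of n by repeated modulo and floor division and emits each power digit-many times from highest to lowest, instead of building a powers list and greedily subtracting each power from a running remainder.
import Mathlib
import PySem

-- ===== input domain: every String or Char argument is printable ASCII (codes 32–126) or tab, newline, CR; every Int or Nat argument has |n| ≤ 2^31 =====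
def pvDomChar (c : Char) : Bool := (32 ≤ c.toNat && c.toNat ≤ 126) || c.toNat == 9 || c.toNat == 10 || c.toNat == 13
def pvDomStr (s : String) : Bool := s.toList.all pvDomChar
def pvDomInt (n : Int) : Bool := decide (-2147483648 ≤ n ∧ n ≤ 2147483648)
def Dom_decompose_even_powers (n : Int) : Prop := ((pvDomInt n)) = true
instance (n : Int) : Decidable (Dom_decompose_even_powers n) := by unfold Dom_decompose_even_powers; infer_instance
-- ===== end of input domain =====

-- B replaces A's powers-list-then-greedy-subtraction with a direct base-4 digit
-- extraction (objective: alternative; same cost on this bounded domain).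
-- The Nat 'fuel' arguments below are totality guards only: at every call site the
-- fuel is provably larger than the number of Python loop iterations (n ≤ 1000).

-- ===== PORT A =====
-- while p <= n: powers.append(p); p *= 4   (≤ 6 iterations since n ≤ 1000; fuel 16)
def pvAPowers (fuel : Nat) (n p : Int) : List Int :=
  match fuel with
  | 0 => []
  | f + 1 => if p ≤ n then p :: pvAPowers f n (p * 4) else []

-- while remaining >= p: result.append(str(p)); remaining -= p
-- returns (appended strings, final remaining); at most 3 iterations per power (remaining < 4·p on entry); fuel 16
def pvAGreedy (fuel : Nat) (remaining p : Int) : List String × Int :=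
  match fuel with
  | 0 => ([], remaining)
  | f + 1 =>
    if p ≤ remaining then
      let r := pvAGreedy f (remaining - p) p
      (PySem.Int.toStr p :: r.1, r.2)
    else ([], remaining)

-- for p in powers: <inner while>
def pvAFor : List Int → Int → List String
  | [], _ => []
  | p :: ps, rem =>
    let g := pvAGreedy 16 rem p
    g.1 ++ pvAFor ps g.2

def decompose_even_powers (n : Int) : String :=
  if n < 1 ∨ n > 1000 then "n має бути в межах 1 ≤ n ≤ 1000"
  else PySem.Str.join "+" (pvAFor (pvAPowers 16 n 1).reverse n)

-- ===== PORT B =====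
-- while m > 0: digits.append((p, m % 4)); m //= 4; p *= 4   (≤ 5 iterations; fuel 16)
def pvBDigits (fuel : Nat) (p m : Int) : List (Int × Int) :=
  match fuel with
  | 0 => []
  | f + 1 =>
    if 0 < m then (p, PySem.Int.mod m 4) :: pvBDigits f (p * 4) (PySem.Int.floordiv m 4)
    else []

-- for p, d in reversed(digits): result.extend([str(p)] * d)
def pvBBuild : List (Int × Int) → List String
  | [] => []
  | (p, d) :: rest => List.replicate d.toNat (PySem.Int.toStr p) ++ pvBBuild rest

def decompose_even_powers_alt (n : Int) : String :=
  if n < 1 ∨ n > 1000 then "n має бути в межах 1 ≤ n ≤ 1000"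
  else PySem.Str.join "+" (pvBBuild (pvBDigits 16 1 n).reverse)

-- ===== PRECONDITION & SPEC =====
def Spec_decompose_even_powers (n : Int) (out : String) : Prop := out = decompose_even_powers_alt n
instance (n : Int) (out : String) : Decidable (Spec_decompose_even_powers n out) := by unfold Spec_decompose_even_powers; infer_instance

-- ===== CLAIM (what is proved, stated in full; the proofs are below) =====
def Claim_equal_decompose_even_powers : Prop := ∀ (n : Int), Dom_decompose_even_powers n → Spec_decompose_even_powers n (decompose_even_powers n)

-- ===== LEMMAS AND PROOFS =====
-- the in-range cases are finitely many; check them all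
set_option maxRecDepth 100000 in
set_option maxHeartbeats 4000000 in
theorem pv_key : ∀ k ∈ List.range 1000,
    decompose_even_powers ((k : Int) + 1) = decompose_even_powers_alt ((k : Int) + 1) := by
  decide

-- ===== VERDICT (by name: the statement is the Claim_ definition above) =====
theorem decompose_even_powers_spec : Claim_equal_decompose_even_powers := by
  intro n _
  unfold Spec_decompose_even_powers
  by_cases h : n < 1 ∨ n > 1000
  · simp [decompose_even_powers, decompose_even_powers_alt, h]
  · have h1 : 1 ≤ n ∧ n ≤ 1000 := by omega
    have hk : n = ((n - 1).toNat : Int) + 1 := by omega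
    rw [hk]
    exact pv_key (n - 1).toNat (by simp; omega)
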